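-- pv_equiv track=rewrite | github.com/combustrrr/AutoMind | nlp_engine.py | suggest_similar_queries
-- ===== SOURCE A (Python) =====
-- from typing import Dict, Optional, List, Tuple
--
-- def suggest_similar_queries(text: str) -> List[str]:
--     """Suggest similar queries based on unclear input."""
--     suggestions = []
--
--     text_lower = text.lower()
--
--     # If mentions price but no other details
--     if any(word in text_lower for word in ['cheap', 'budget', 'under', 'above', 'lakhs', 'lacs']):
--         suggestions.append("Try: 'Cheap hatchback under 10 lakhs'")
--         suggestions.append("Or: 'SUV under 20 lakhs'")
--
--     # If mentions luxury but no details
--     if any(word in text_lower for word in ['luxury', 'premium', 'expensive']):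
--         suggestions.append("Try: 'Luxury sedan above 30 lakhs'")
--         suggestions.append("Or: 'Premium BMW sedan'")
--
--     # If mentions fuel but no type
--     if any(word in text_lower for word in ['electric', 'ev', 'diesel', 'petrol']):
--         suggestions.append("Try: 'Electric hatchback'")
--         suggestions.append("Or: 'Diesel SUV under 25 lakhs'")
--
--     # Generic suggestions if none match
--     if not suggestions:
--         suggestions = [
--             "Try: 'Toyota SUV under 20 lakhs'",
--             "Or: 'Cheap Maruti hatchback'",
--             "Or: 'Electric cars under 30 lakhs'"
--         ]
--
--     return suggestions[:3]  # Return top 3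
-- ===== SOURCE B (Python) =====
-- from typing import List
--
-- PRICE_KW = ['cheap', 'budget', 'under', 'above', 'lakhs', 'lacs']
-- LUX_KW = ['luxury', 'premium', 'expensive']
-- FUEL_KW = ['electric', 'ev', 'diesel', 'petrol']
--
-- PRICE_MSGS = ["Try: 'Cheap hatchback under 10 lakhs'", "Or: 'SUV under 20 lakhs'"]
-- LUX_MSGS = ["Try: 'Luxury sedan above 30 lakhs'", "Or: 'Premium BMW sedan'"]
-- FUEL_MSGS = ["Try: 'Electric hatchback'", "Or: 'Diesel SUV under 25 lakhs'"]
--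
-- GENERIC = [
--     "Try: 'Toyota SUV under 20 lakhs'",
--     "Or: 'Cheap Maruti hatchback'",
--     "Or: 'Electric cars under 30 lakhs'",
-- ]
--
-- def _bucket(p: bool, l: bool, f: bool) -> List[str]:
--     s = (PRICE_MSGS if p else []) + (LUX_MSGS if l else []) + (FUEL_MSGS if f else [])
--     return (s if s else GENERIC)[:3]
--
-- # All 8 possible answers, precomputed once; index = 4*price + 2*luxury + 1*fuel.
-- TABLE = [_bucket(p, l, f)
--          for p in (False, True) for l in (False, True) for f in (False, True)]
--
-- def suggest_similar_queries(text: str) -> List[str]: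
--     t = text.lower()
--     i = ((4 if any(w in t for w in PRICE_KW) else 0)
--          + (2 if any(w in t for w in LUX_KW) else 0)
--          + (1 if any(w in t for w in FUEL_KW) else 0))
--     return list(TABLE[i])
-- ===== Notes on version B (the rewrite author's own statement) =====
-- stated objective: alternative
-- what changed: B precomputes all 8 possible answers (fallback and [:3] truncation baked in) in a lookup table indexed by the 3-bit match pattern, so the function itself only classifies the text and returns one table entry, with no list building, fallback test or slicing at call time.
import Mathlib
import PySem

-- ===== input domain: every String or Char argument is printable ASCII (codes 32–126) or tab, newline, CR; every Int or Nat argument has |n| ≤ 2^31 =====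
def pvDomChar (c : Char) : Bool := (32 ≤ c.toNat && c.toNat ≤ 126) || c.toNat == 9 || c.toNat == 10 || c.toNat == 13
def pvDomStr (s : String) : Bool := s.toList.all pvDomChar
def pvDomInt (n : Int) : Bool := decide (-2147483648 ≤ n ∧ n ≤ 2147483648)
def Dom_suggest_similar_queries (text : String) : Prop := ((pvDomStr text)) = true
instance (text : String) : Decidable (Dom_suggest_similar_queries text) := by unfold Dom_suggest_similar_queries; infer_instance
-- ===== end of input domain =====

-- B precomputes all 8 possible answers (fallback and truncation baked in) in a table
-- indexed by the 3-bit keyword-match pattern; at call time it only classifies the text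
-- and returns one table entry (alternative decomposition; same cost).

-- ===== PORT A =====
def suggest_similar_queries (text : String) : List String :=
  let suggestions : List String := []
  let text_lower := PySem.Str.lower text
  let suggestions :=
    if (["cheap", "budget", "under", "above", "lakhs", "lacs"].any
        (fun word => PySem.Str.isIn word text_lower)) then
      suggestions ++ ["Try: 'Cheap hatchback under 10 lakhs'"] ++ ["Or: 'SUV under 20 lakhs'"]
    else suggestions
  let suggestions :=
    if (["luxury", "premium", "expensive"].any
        (fun word => PySem.Str.isIn word text_lower)) then
      suggestions ++ ["Try: 'Luxury sedan above 30 lakhs'"] ++ ["Or: 'Premium BMW sedan'"]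
    else suggestions
  let suggestions :=
    if (["electric", "ev", "diesel", "petrol"].any
        (fun word => PySem.Str.isIn word text_lower)) then
      suggestions ++ ["Try: 'Electric hatchback'"] ++ ["Or: 'Diesel SUV under 25 lakhs'"]
    else suggestions
  let suggestions :=
    if suggestions.isEmpty then
      ["Try: 'Toyota SUV under 20 lakhs'",
       "Or: 'Cheap Maruti hatchback'",
       "Or: 'Electric cars under 30 lakhs'"]
    else suggestions
  PySem.List.slice suggestions none (some 3)

-- ===== PORT B =====
def pvPriceKw : List String := ["cheap", "budget", "under", "above", "lakhs", "lacs"]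
def pvLuxKw : List String := ["luxury", "premium", "expensive"]
def pvFuelKw : List String := ["electric", "ev", "diesel", "petrol"]

def pvPriceMsgs : List String := ["Try: 'Cheap hatchback under 10 lakhs'", "Or: 'SUV under 20 lakhs'"]
def pvLuxMsgs : List String := ["Try: 'Luxury sedan above 30 lakhs'", "Or: 'Premium BMW sedan'"]
def pvFuelMsgs : List String := ["Try: 'Electric hatchback'", "Or: 'Diesel SUV under 25 lakhs'"]

def pvGeneric : List String :=
  ["Try: 'Toyota SUV under 20 lakhs'",
   "Or: 'Cheap Maruti hatchback'",
   "Or: 'Electric cars under 30 lakhs'"]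

def pvBucket (p l f : Bool) : List String :=
  let s := (if p then pvPriceMsgs else []) ++ (if l then pvLuxMsgs else []) ++ (if f then pvFuelMsgs else [])
  PySem.List.slice (if s.isEmpty then pvGeneric else s) none (some 3)

-- the list comprehension over (False, True)³, index = 4*p + 2*l + f
def pvTable : List (List String) :=
  [false, true].flatMap (fun p =>
    [false, true].flatMap (fun l =>
      [false, true].map (fun f => pvBucket p l f)))

def suggest_similar_queries_alt (text : String) : List String :=
  let t := PySem.Str.lower text
  let i : Nat :=
    (if pvPriceKw.any (fun w => PySem.Str.isIn w t) then 4 else 0)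
    + (if pvLuxKw.any (fun w => PySem.Str.isIn w t) then 2 else 0)
    + (if pvFuelKw.any (fun w => PySem.Str.isIn w t) then 1 else 0)
  -- TABLE[i]: i < 8 by construction, so Python's indexing never raises
  pvTable.getD i []

-- ===== PRECONDITION & SPEC =====
def Spec_suggest_similar_queries (text : String) (out : List String) : Prop := out = suggest_similar_queries_alt text
instance (text : String) (out : List String) : Decidable (Spec_suggest_similar_queries text out) := by unfold Spec_suggest_similar_queries; infer_instance

-- ===== CLAIM (what is proved, stated in full; the proofs are below) =====
def Claim_equal_suggest_similar_queries : Prop := ∀ (text : String), Dom_suggest_similar_queries text → Spec_suggest_similar_queries text (suggest_similar_queries text)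

-- ===== LEMMAS AND PROOFS =====

-- ===== VERDICT (by name: the statement is the Claim_ definition above) =====
theorem suggest_similar_queries_spec : Claim_equal_suggest_similar_queries := by
  intro text _
  unfold Spec_suggest_similar_queries suggest_similar_queries suggest_similar_queries_alt
  unfold pvPriceKw pvLuxKw pvFuelKw
  cases hp : (["cheap", "budget", "under", "above", "lakhs", "lacs"].any
      (fun word => PySem.Str.isIn word (PySem.Str.lower text))) <;>
  cases hl : (["luxury", "premium", "expensive"].any
      (fun word => PySem.Str.isIn word (PySem.Str.lower text))) <;>
  cases hf : (["electric", "ev", "diesel", "petrol"].any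
      (fun word => PySem.Str.isIn word (PySem.Str.lower text))) <;>
  simp only [hp, hl, hf, if_true, if_false, Bool.false_eq_true] <;>
  rfl
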